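-- pv_equiv track=rewrite | github.com/Yasir2690/university-search-bot | telegram_bot.py | get_response
-- ===== SOURCE A (Python) =====
-- def get_response(user_input):
--     user_lower = user_input.lower()
--
--     # Simple response logic
--     if any(word in user_lower for word in ['hi', 'hello', 'hey']):
--         return "Hello! Welcome to College Help Bot! Ask me about admissions, fees, courses, placements, hostel, sports, etc."
--     elif any(word in user_lower for word in ['fee', 'cost', 'price', 'tuition']):
--         return "📚 Fee Structure:\n• Engineering: Rs 1.5L/year\n• MBA: Rs 2L/year\n• BSc: Rs 80k/year\n\nScholarships available!"
--     elif any(word in user_lower for word in ['course', 'program', 'degree', 'btech']):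
--         return "🎓 Courses Offered:\n• B.Tech (CS, IT, Mechanical, Civil, Electrical)\n• MBA\n• BCA, MCA\n• BSc, MSc\n• PhD programs"
--     elif any(word in user_lower for word in ['placement', 'job', 'package', 'recruiter']):
--         return "💼 Placement Record:\n• 95% placement rate\n• Average package: Rs 8.5 LPA\n• Top recruiters: Google, Microsoft, Amazon, Deloitte"
--     elif any(word in user_lower for word in ['hostel', 'accommodation', 'room']):
--         return "🏠 Hostel Details:\n• Fees: Rs 60,000/year\n• In-time: 9 PM\n• Facilities: WiFi, Gym, Common Room, Mess"
--     elif any(word in user_lower for word in ['sports', 'cricket', 'football', 'gym']):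
--         return "⚽ Sports Facilities:\n• Cricket ground\n• Football ground\n• Basketball court\n• Swimming pool\n• Modern gymnasium"
--     elif any(word in user_lower for word in ['admission', 'apply', 'eligibility']):
--         return "📝 Admission Requirements:\n• Minimum 60% in 12th\n• Entrance exam required\n• Application deadline: May 30th, 2026"
--     elif any(word in user_lower for word in ['scholarship', 'financial', 'aid']):
--         return "💰 Scholarships:\n• Merit-based: Up to 100%\n• Sports quota: 50% waiver\n• Need-based financial aid available"
--     elif any(word in user_lower for word in ['exam', 'test', 'semester']):
--         return "📅 Exam Schedule:\n• Mid-term: Sept 15-25\n• Finals: Dec 1-15\n• Practicals start 1 week before theory"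
--     elif any(word in user_lower for word in ['bye', 'goodbye', 'thanks', 'thank']):
--         return "You're welcome! Feel free to ask anytime. Have a great day! 🎓"
--     else:
--         return "🤔 I can help with:\n• Admissions\n• Fees & Scholarships\n• Courses\n• Placements\n• Hostel & Sports\n• Exam schedules\n\nTry asking something specific!"
-- ===== SOURCE B (Python) =====
-- RESPONSES = [
--     "Hello! Welcome to College Help Bot! Ask me about admissions, fees, courses, placements, hostel, sports, etc.",
--     "\U0001F4DA Fee Structure:\n\u2022 Engineering: Rs 1.5L/year\n\u2022 MBA: Rs 2L/year\n\u2022 BSc: Rs 80k/year\n\nScholarships available!",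
--     "\U0001F393 Courses Offered:\n\u2022 B.Tech (CS, IT, Mechanical, Civil, Electrical)\n\u2022 MBA\n\u2022 BCA, MCA\n\u2022 BSc, MSc\n\u2022 PhD programs",
--     "\U0001F4BC Placement Record:\n\u2022 95% placement rate\n\u2022 Average package: Rs 8.5 LPA\n\u2022 Top recruiters: Google, Microsoft, Amazon, Deloitte",
--     "\U0001F3E0 Hostel Details:\n\u2022 Fees: Rs 60,000/year\n\u2022 In-time: 9 PM\n\u2022 Facilities: WiFi, Gym, Common Room, Mess",
--     "\u26BD Sports Facilities:\n\u2022 Cricket ground\n\u2022 Football ground\n\u2022 Basketball court\n\u2022 Swimming pool\n\u2022 Modern gymnasium",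
--     "\U0001F4DD Admission Requirements:\n\u2022 Minimum 60% in 12th\n\u2022 Entrance exam required\n\u2022 Application deadline: May 30th, 2026",
--     "\U0001F4B0 Scholarships:\n\u2022 Merit-based: Up to 100%\n\u2022 Sports quota: 50% waiver\n\u2022 Need-based financial aid available",
--     "\U0001F4C5 Exam Schedule:\n\u2022 Mid-term: Sept 15-25\n\u2022 Finals: Dec 1-15\n\u2022 Practicals start 1 week before theory",
--     "You're welcome! Feel free to ask anytime. Have a great day! \U0001F393",
--     "\U0001F914 I can help with:\n\u2022 Admissions\n\u2022 Fees & Scholarships\n\u2022 Courses\n\u2022 Placements\n\u2022 Hostel & Sports\n\u2022 Exam schedules\n\nTry asking something specific!",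
-- ]
--
-- # Flat keyword -> priority pairs, listed from LOWEST priority to HIGHEST: a single
-- # overwrite scan leaves `best` holding the highest-priority (smallest index) match.
-- KEYWORD_PRIORITY = [
--     ('thank', 9), ('thanks', 9), ('goodbye', 9), ('bye', 9),
--     ('semester', 8), ('test', 8), ('exam', 8),
--     ('aid', 7), ('financial', 7), ('scholarship', 7),
--     ('eligibility', 6), ('apply', 6), ('admission', 6),
--     ('gym', 5), ('football', 5), ('cricket', 5), ('sports', 5),
--     ('room', 4), ('accommodation', 4), ('hostel', 4),
--     ('recruiter', 3), ('package', 3), ('job', 3), ('placement', 3),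
--     ('btech', 2), ('degree', 2), ('program', 2), ('course', 2),
--     ('tuition', 1), ('price', 1), ('cost', 1), ('fee', 1),
--     ('hey', 0), ('hello', 0), ('hi', 0),
-- ]
--
-- def get_response(user_input):
--     user_lower = user_input.lower()
--     best = 10  # index of the default reply
--     for keyword, priority in KEYWORD_PRIORITY:
--         if keyword in user_lower:
--             best = priority
--     return RESPONSES[best]
-- ===== Notes on version B (the rewrite author's own statement) =====
-- stated objective: alternative
-- what changed: Replaced the grouped elif chain (early return on first matching group) by a flat keyword->priority pair list scanned once from lowest to highest priority with an overwrite accumulator, the final priority indexing a response array; correct because the last overwrite is the highest-priority (earliest elif) matching keyword.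
import Mathlib
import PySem

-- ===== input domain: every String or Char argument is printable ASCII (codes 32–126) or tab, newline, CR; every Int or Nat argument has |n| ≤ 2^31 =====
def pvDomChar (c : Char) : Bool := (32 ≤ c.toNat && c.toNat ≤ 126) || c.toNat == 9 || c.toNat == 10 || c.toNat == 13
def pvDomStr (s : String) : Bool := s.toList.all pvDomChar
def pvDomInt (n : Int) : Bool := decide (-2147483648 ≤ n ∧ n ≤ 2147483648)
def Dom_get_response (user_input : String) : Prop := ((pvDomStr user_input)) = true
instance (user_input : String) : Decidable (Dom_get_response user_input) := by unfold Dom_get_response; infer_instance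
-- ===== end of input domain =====

-- B replaces A's grouped elif chain by one overwrite scan of a flat keyword→priority list (lowest→highest priority), then indexes a response array: an alternative data-driven decomposition, same cost.


-- the canned replies, shared verbatim by both ports
def respGreet : String := "Hello! Welcome to College Help Bot! Ask me about admissions, fees, courses, placements, hostel, sports, etc."
def respFee : String := "📚 Fee Structure:\n• Engineering: Rs 1.5L/year\n• MBA: Rs 2L/year\n• BSc: Rs 80k/year\n\nScholarships available!"
def respCourse : String := "🎓 Courses Offered:\n• B.Tech (CS, IT, Mechanical, Civil, Electrical)\n• MBA\n• BCA, MCA\n• BSc, MSc\n• PhD programs"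
def respPlacement : String := "💼 Placement Record:\n• 95% placement rate\n• Average package: Rs 8.5 LPA\n• Top recruiters: Google, Microsoft, Amazon, Deloitte"
def respHostel : String := "🏠 Hostel Details:\n• Fees: Rs 60,000/year\n• In-time: 9 PM\n• Facilities: WiFi, Gym, Common Room, Mess"
def respSports : String := "⚽ Sports Facilities:\n• Cricket ground\n• Football ground\n• Basketball court\n• Swimming pool\n• Modern gymnasium"
def respAdmission : String := "📝 Admission Requirements:\n• Minimum 60% in 12th\n• Entrance exam required\n• Application deadline: May 30th, 2026"
def respScholar : String := "💰 Scholarships:\n• Merit-based: Up to 100%\n• Sports quota: 50% waiver\n• Need-based financial aid available"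
def respExam : String := "📅 Exam Schedule:\n• Mid-term: Sept 15-25\n• Finals: Dec 1-15\n• Practicals start 1 week before theory"
def respBye : String := "You're welcome! Feel free to ask anytime. Have a great day! 🎓"
def respDefault : String := "🤔 I can help with:\n• Admissions\n• Fees & Scholarships\n• Courses\n• Placements\n• Hostel & Sports\n• Exam schedules\n\nTry asking something specific!"

-- ===== PORT A =====
def get_response (user_input : String) : String :=
  let user_lower := PySem.Str.lower user_input
  if (["hi", "hello", "hey"].any (fun word => PySem.Str.isIn word user_lower)) then respGreet
  else if (["fee", "cost", "price", "tuition"].any (fun word => PySem.Str.isIn word user_lower)) then respFee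
  else if (["course", "program", "degree", "btech"].any (fun word => PySem.Str.isIn word user_lower)) then respCourse
  else if (["placement", "job", "package", "recruiter"].any (fun word => PySem.Str.isIn word user_lower)) then respPlacement
  else if (["hostel", "accommodation", "room"].any (fun word => PySem.Str.isIn word user_lower)) then respHostel
  else if (["sports", "cricket", "football", "gym"].any (fun word => PySem.Str.isIn word user_lower)) then respSports
  else if (["admission", "apply", "eligibility"].any (fun word => PySem.Str.isIn word user_lower)) then respAdmission
  else if (["scholarship", "financial", "aid"].any (fun word => PySem.Str.isIn word user_lower)) then respScholar
  else if (["exam", "test", "semester"].any (fun word => PySem.Str.isIn word user_lower)) then respExam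
  else if (["bye", "goodbye", "thanks", "thank"].any (fun word => PySem.Str.isIn word user_lower)) then respBye
  else respDefault

-- ===== PORT B =====
-- RESPONSES array; index 10 is the default reply
def responsesB : List String :=
  [respGreet, respFee, respCourse, respPlacement, respHostel, respSports,
   respAdmission, respScholar, respExam, respBye, respDefault]

-- flat keyword→priority pairs, lowest priority first: the last overwrite wins
def kwPriority : List (String × Nat) :=
  [ ("thank", 9),
    ("thanks", 9),
    ("goodbye", 9),
    ("bye", 9),
    ("semester", 8),
    ("test", 8),
    ("exam", 8),
    ("aid", 7),
    ("financial", 7),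
    ("scholarship", 7),
    ("eligibility", 6),
    ("apply", 6),
    ("admission", 6),
    ("gym", 5),
    ("football", 5),
    ("cricket", 5),
    ("sports", 5),
    ("room", 4),
    ("accommodation", 4),
    ("hostel", 4),
    ("recruiter", 3),
    ("package", 3),
    ("job", 3),
    ("placement", 3),
    ("btech", 2),
    ("degree", 2),
    ("program", 2),
    ("course", 2),
    ("tuition", 1),
    ("price", 1),
    ("cost", 1),
    ("fee", 1),
    ("hey", 0),
    ("hello", 0),
    ("hi", 0) ]

def get_response_alt (user_input : String) : String :=
  let user_lower := PySem.Str.lower user_input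
  let best := kwPriority.foldl
    (fun best kv => if PySem.Str.isIn kv.1 user_lower then kv.2 else best) 10
  -- RESPONSES[best]: best is always in 0..10, so plain list indexing is exact here
  responsesB.getD best respDefault

-- ===== PRECONDITION & SPEC =====
def Spec_get_response (user_input : String) (out : String) : Prop := out = get_response_alt user_input
instance (user_input : String) (out : String) : Decidable (Spec_get_response user_input out) := by unfold Spec_get_response; infer_instance

-- ===== CLAIM (what is proved, stated in full; the proofs are below) =====
def Claim_equal_get_response : Prop := ∀ (user_input : String), Dom_get_response user_input → Spec_get_response user_input (get_response user_input)

-- ===== LEMMAS AND PROOFS =====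

-- ===== VERDICT (by name: the statement is the Claim_ definition above) =====
theorem get_response_spec : Claim_equal_get_response := by
  intro user_input _
  unfold Spec_get_response get_response get_response_alt kwPriority responsesB
  simp only [List.foldl, List.any_cons, List.any_nil]
  cases h0 : PySem.Str.isIn "hi" (PySem.Str.lower user_input) <;> simp only [h0, Bool.false_or, Bool.true_or, Bool.or_true, Bool.or_false, if_true, if_false, Bool.false_eq_true, ite_true, ite_false]
  cases h1 : PySem.Str.isIn "hello" (PySem.Str.lower user_input) <;> simp only [h1, Bool.false_or, Bool.true_or, Bool.or_true, Bool.or_false, if_true, if_false, Bool.false_eq_true, ite_true, ite_false]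
  cases h2 : PySem.Str.isIn "hey" (PySem.Str.lower user_input) <;> simp only [h2, Bool.false_or, Bool.true_or, Bool.or_true, Bool.or_false, if_true, if_false, Bool.false_eq_true, ite_true, ite_false]
  cases h3 : PySem.Str.isIn "fee" (PySem.Str.lower user_input) <;> simp only [h3, Bool.false_or, Bool.true_or, Bool.or_true, Bool.or_false, if_true, if_false, Bool.false_eq_true, ite_true, ite_false]
  cases h4 : PySem.Str.isIn "cost" (PySem.Str.lower user_input) <;> simp only [h4, Bool.false_or, Bool.true_or, Bool.or_true, Bool.or_false, if_true, if_false, Bool.false_eq_true, ite_true, ite_false]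
  cases h5 : PySem.Str.isIn "price" (PySem.Str.lower user_input) <;> simp only [h5, Bool.false_or, Bool.true_or, Bool.or_true, Bool.or_false, if_true, if_false, Bool.false_eq_true, ite_true, ite_false]
  cases h6 : PySem.Str.isIn "tuition" (PySem.Str.lower user_input) <;> simp only [h6, Bool.false_or, Bool.true_or, Bool.or_true, Bool.or_false, if_true, if_false, Bool.false_eq_true, ite_true, ite_false]
  cases h7 : PySem.Str.isIn "course" (PySem.Str.lower user_input) <;> simp only [h7, Bool.false_or, Bool.true_or, Bool.or_true, Bool.or_false, if_true, if_false, Bool.false_eq_true, ite_true, ite_false]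
  cases h8 : PySem.Str.isIn "program" (PySem.Str.lower user_input) <;> simp only [h8, Bool.false_or, Bool.true_or, Bool.or_true, Bool.or_false, if_true, if_false, Bool.false_eq_true, ite_true, ite_false]
  cases h9 : PySem.Str.isIn "degree" (PySem.Str.lower user_input) <;> simp only [h9, Bool.false_or, Bool.true_or, Bool.or_true, Bool.or_false, if_true, if_false, Bool.false_eq_true, ite_true, ite_false]
  cases h10 : PySem.Str.isIn "btech" (PySem.Str.lower user_input) <;> simp only [h10, Bool.false_or, Bool.true_or, Bool.or_true, Bool.or_false, if_true, if_false, Bool.false_eq_true, ite_true, ite_false]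
  cases h11 : PySem.Str.isIn "placement" (PySem.Str.lower user_input) <;> simp only [h11, Bool.false_or, Bool.true_or, Bool.or_true, Bool.or_false, if_true, if_false, Bool.false_eq_true, ite_true, ite_false]
  cases h12 : PySem.Str.isIn "job" (PySem.Str.lower user_input) <;> simp only [h12, Bool.false_or, Bool.true_or, Bool.or_true, Bool.or_false, if_true, if_false, Bool.false_eq_true, ite_true, ite_false]
  cases h13 : PySem.Str.isIn "package" (PySem.Str.lower user_input) <;> simp only [h13, Bool.false_or, Bool.true_or, Bool.or_true, Bool.or_false, if_true, if_false, Bool.false_eq_true, ite_true, ite_false]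
  cases h14 : PySem.Str.isIn "recruiter" (PySem.Str.lower user_input) <;> simp only [h14, Bool.false_or, Bool.true_or, Bool.or_true, Bool.or_false, if_true, if_false, Bool.false_eq_true, ite_true, ite_false]
  cases h15 : PySem.Str.isIn "hostel" (PySem.Str.lower user_input) <;> simp only [h15, Bool.false_or, Bool.true_or, Bool.or_true, Bool.or_false, if_true, if_false, Bool.false_eq_true, ite_true, ite_false]
  cases h16 : PySem.Str.isIn "accommodation" (PySem.Str.lower user_input) <;> simp only [h16, Bool.false_or, Bool.true_or, Bool.or_true, Bool.or_false, if_true, if_false, Bool.false_eq_true, ite_true, ite_false]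
  cases h17 : PySem.Str.isIn "room" (PySem.Str.lower user_input) <;> simp only [h17, Bool.false_or, Bool.true_or, Bool.or_true, Bool.or_false, if_true, if_false, Bool.false_eq_true, ite_true, ite_false]
  cases h18 : PySem.Str.isIn "sports" (PySem.Str.lower user_input) <;> simp only [h18, Bool.false_or, Bool.true_or, Bool.or_true, Bool.or_false, if_true, if_false, Bool.false_eq_true, ite_true, ite_false]
  cases h19 : PySem.Str.isIn "cricket" (PySem.Str.lower user_input) <;> simp only [h19, Bool.false_or, Bool.true_or, Bool.or_true, Bool.or_false, if_true, if_false, Bool.false_eq_true, ite_true, ite_false]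
  cases h20 : PySem.Str.isIn "football" (PySem.Str.lower user_input) <;> simp only [h20, Bool.false_or, Bool.true_or, Bool.or_true, Bool.or_false, if_true, if_false, Bool.false_eq_true, ite_true, ite_false]
  cases h21 : PySem.Str.isIn "gym" (PySem.Str.lower user_input) <;> simp only [h21, Bool.false_or, Bool.true_or, Bool.or_true, Bool.or_false, if_true, if_false, Bool.false_eq_true, ite_true, ite_false]
  cases h22 : PySem.Str.isIn "admission" (PySem.Str.lower user_input) <;> simp only [h22, Bool.false_or, Bool.true_or, Bool.or_true, Bool.or_false, if_true, if_false, Bool.false_eq_true, ite_true, ite_false]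
  cases h23 : PySem.Str.isIn "apply" (PySem.Str.lower user_input) <;> simp only [h23, Bool.false_or, Bool.true_or, Bool.or_true, Bool.or_false, if_true, if_false, Bool.false_eq_true, ite_true, ite_false]
  cases h24 : PySem.Str.isIn "eligibility" (PySem.Str.lower user_input) <;> simp only [h24, Bool.false_or, Bool.true_or, Bool.or_true, Bool.or_false, if_true, if_false, Bool.false_eq_true, ite_true, ite_false]
  cases h25 : PySem.Str.isIn "scholarship" (PySem.Str.lower user_input) <;> simp only [h25, Bool.false_or, Bool.true_or, Bool.or_true, Bool.or_false, if_true, if_false, Bool.false_eq_true, ite_true, ite_false]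
  cases h26 : PySem.Str.isIn "financial" (PySem.Str.lower user_input) <;> simp only [h26, Bool.false_or, Bool.true_or, Bool.or_true, Bool.or_false, if_true, if_false, Bool.false_eq_true, ite_true, ite_false]
  cases h27 : PySem.Str.isIn "aid" (PySem.Str.lower user_input) <;> simp only [h27, Bool.false_or, Bool.true_or, Bool.or_true, Bool.or_false, if_true, if_false, Bool.false_eq_true, ite_true, ite_false]
  cases h28 : PySem.Str.isIn "exam" (PySem.Str.lower user_input) <;> simp only [h28, Bool.false_or, Bool.true_or, Bool.or_true, Bool.or_false, if_true, if_false, Bool.false_eq_true, ite_true, ite_false]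
  cases h29 : PySem.Str.isIn "test" (PySem.Str.lower user_input) <;> simp only [h29, Bool.false_or, Bool.true_or, Bool.or_true, Bool.or_false, if_true, if_false, Bool.false_eq_true, ite_true, ite_false]
  cases h30 : PySem.Str.isIn "semester" (PySem.Str.lower user_input) <;> simp only [h30, Bool.false_or, Bool.true_or, Bool.or_true, Bool.or_false, if_true, if_false, Bool.false_eq_true, ite_true, ite_false]
  cases h31 : PySem.Str.isIn "bye" (PySem.Str.lower user_input) <;> simp only [h31, Bool.false_or, Bool.true_or, Bool.or_true, Bool.or_false, if_true, if_false, Bool.false_eq_true, ite_true, ite_false]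
  cases h32 : PySem.Str.isIn "goodbye" (PySem.Str.lower user_input) <;> simp only [h32, Bool.false_or, Bool.true_or, Bool.or_true, Bool.or_false, if_true, if_false, Bool.false_eq_true, ite_true, ite_false]
  cases h33 : PySem.Str.isIn "thanks" (PySem.Str.lower user_input) <;> simp only [h33, Bool.false_or, Bool.true_or, Bool.or_true, Bool.or_false, if_true, if_false, Bool.false_eq_true, ite_true, ite_false]
  cases h34 : PySem.Str.isIn "thank" (PySem.Str.lower user_input) <;> simp only [h34, Bool.false_or, Bool.true_or, Bool.or_true, Bool.or_false, if_true, if_false, Bool.false_eq_true, ite_true, ite_false]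
  all_goals rfl
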